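-- pv_equiv track=rewrite | github.com/CALeong/Strained_hyperbolic_Dirac_fermions_zero_modes_flat_bands_and_competing_orders | Fundamental/Honeycomb_Lattice.py | honeycomb_number_plaquets
-- ===== SOURCE A (Python) =====
-- def honeycomb_number_plaquets(nl):
--     numberplaquets = 0
--     for n in range(nl):
--         if n+1 == 1:
--             numberplaquets += 1
--         else:
--             numberplaquets += (n+1)*6 - 6
--     return(numberplaquets)
-- ===== SOURCE B (Python) =====
-- def honeycomb_number_plaquets(nl):
--     # closed-form arithmetic series: center plaquet + 6*(ring index) per ring
--     if nl <= 0: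
--         return 0
--     return 1 + 3 * nl * (nl - 1)
-- ===== Notes on version B (the rewrite author's own statement) =====
-- stated objective: faster
-- what changed: Replaces the O(n) loop summing ring sizes with the closed-form arithmetic-series formula 1 + 3*nl*(nl-1) (0 for nl <= 0).
import Mathlib
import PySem

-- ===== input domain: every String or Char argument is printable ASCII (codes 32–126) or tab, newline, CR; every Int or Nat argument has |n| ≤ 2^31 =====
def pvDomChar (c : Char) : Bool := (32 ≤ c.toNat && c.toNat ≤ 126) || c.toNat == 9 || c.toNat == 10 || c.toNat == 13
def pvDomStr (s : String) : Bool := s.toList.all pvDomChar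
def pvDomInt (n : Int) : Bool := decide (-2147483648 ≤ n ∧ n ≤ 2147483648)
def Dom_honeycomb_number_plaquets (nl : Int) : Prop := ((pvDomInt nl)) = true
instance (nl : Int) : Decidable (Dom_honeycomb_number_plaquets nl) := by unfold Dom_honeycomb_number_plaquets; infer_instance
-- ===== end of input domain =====

-- B replaces A's O(n) accumulation loop with the closed-form formula 1 + 3*nl*(nl-1) (faster, asymptotic).

-- ===== PORT A =====
def honeycomb_number_plaquets (nl : Int) : Int :=
  (PySem.List.pyRange 0 nl 1).foldl
    (fun numberplaquets n =>
      if n + 1 == 1 then numberplaquets + 1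
      else numberplaquets + ((n + 1) * 6 - 6)) 0

-- ===== PORT B =====
def honeycomb_number_plaquets_alt (nl : Int) : Int :=
  if nl ≤ 0 then 0 else 1 + 3 * nl * (nl - 1)

-- ===== PRECONDITION & SPEC =====
def Spec_honeycomb_number_plaquets (nl : Int) (out : Int) : Prop := out = honeycomb_number_plaquets_alt nl
instance (nl : Int) (out : Int) : Decidable (Spec_honeycomb_number_plaquets nl out) := by unfold Spec_honeycomb_number_plaquets; infer_instance

-- ===== CLAIM (what is proved, stated in full; the proofs are below) =====
def Claim_equal_honeycomb_number_plaquets : Prop := ∀ (nl : Int), Dom_honeycomb_number_plaquets nl → Spec_honeycomb_number_plaquets nl (honeycomb_number_plaquets nl)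

-- ===== LEMMAS AND PROOFS =====
theorem hnp_loop (k : Nat) :
    honeycomb_number_plaquets (k : Int) = if (k : Int) ≤ 0 then 0 else 1 + 3 * (k : Int) * ((k : Int) - 1) := by
  induction k with
  | zero => simp [honeycomb_number_plaquets]
  | succ m ih =>
      have h : ((m : Int) + 1) = ((m : Int)) + 1 := rfl
      have hr := PySem.List.pyRange_one_succ_right (a := 0) (b := (m : Int)) (by positivity)
      unfold honeycomb_number_plaquets at ih ⊢
      push_cast
      rw [hr, List.foldl_append]
      rw [show ((m : Int)) = ((m : Nat) : Int) from rfl] at *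
      rw [ih]
      by_cases hm : m = 0
      · subst hm; simp
      · have hm' : (0 : Int) < (m : Int) := by positivity
        simp only [List.foldl]
        have : ¬ ((m : Int) + 1 == 1) = true := by
          simp; omega
        rw [if_neg this, if_neg (by omega), if_neg (by omega)]
        ring

-- ===== VERDICT (by name: the statement is the Claim_ definition above) =====
theorem honeycomb_number_plaquets_spec : Claim_equal_honeycomb_number_plaquets := by
  intro nl _
  unfold Spec_honeycomb_number_plaquets honeycomb_number_plaquets_alt
  by_cases h : nl ≤ 0
  · rw [if_pos h]
    unfold honeycomb_number_plaquets
    rw [PySem.List.pyRange_one_eq_nil h]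
    rfl
  · rw [if_neg h]
    have hn : nl = ((nl.toNat : Nat) : Int) := by omega
    rw [hn]
    rw [hnp_loop nl.toNat]
    rw [if_neg (by omega)]
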